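-- pv_equiv track=rewrite | github.com/yskang/AlgorithmPractice | baekjoon/python/dolbear_30013.py | solution
-- ===== SOURCE A (Python) =====
-- def check(p: int, ks: list, xs: set, min_num: int, f: int) -> int:
--     count = 0
--     first = f
--     while True:
--         # 1. find first '#', count += 1
--         for i in range(first, len(ks)):
--             if ks[i] == '#':
--                 count += 1
--                 first = i
--                 break
--         else:
--             break
--
--         if count >= min_num:
--             return count
--
--         # 2. remove from first position to end
--         for i in range(first, len(ks), p):
--             if ks[i] == '#':
--                 ks[i] = '.'
--                 xs.add(i)
--             else:
--                 break
--
--     return count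
--
-- def solution(n: int, ks: list) -> int:
--     xs = set()
--     ps = [i for i in range(1, n)]
--     min_num = 10**10
--
--     first = 0
--     for i in range(len(ks)):
--         if ks[i] == '#':
--             first = i
--             break
--
--     for p in ps:
--         num = check(p, ks, xs, min_num, first)
--         if num < min_num:
--             min_num = num
--         while xs:
--             ks[xs.pop()] = '#'
--
--     return min_num
-- ===== SOURCE B (Python) =====
-- def solution(n: int, ks: list) -> int:
--     # counts '#'-groups per step p via the "chain start" characterisation:
--     # a '#' at i starts a chain for step p iff i < p or position i-p is not '#'
--     hs = {i for i, c in enumerate(ks) if c == '#'}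
--     best = 10 ** 10
--     for p in range(1, n):
--         best = min(best, sum(1 for i in hs if i < p or i - p not in hs))
--     return best
-- ===== Notes on version B (the rewrite author's own statement) =====
-- stated objective: faster
-- what changed: B replaces A's destructive simulation (repeatedly find the first '#', erase the whole chain i,i+p,i+2p,..., and undo the mutations after every p) by a direct closed-form count: for each step p a '#' at i starts a chain iff i < p or i-p is not '#', so the group count is one set-membership test per '#' with no scanning, mutation or restore pass.
import Mathlib
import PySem

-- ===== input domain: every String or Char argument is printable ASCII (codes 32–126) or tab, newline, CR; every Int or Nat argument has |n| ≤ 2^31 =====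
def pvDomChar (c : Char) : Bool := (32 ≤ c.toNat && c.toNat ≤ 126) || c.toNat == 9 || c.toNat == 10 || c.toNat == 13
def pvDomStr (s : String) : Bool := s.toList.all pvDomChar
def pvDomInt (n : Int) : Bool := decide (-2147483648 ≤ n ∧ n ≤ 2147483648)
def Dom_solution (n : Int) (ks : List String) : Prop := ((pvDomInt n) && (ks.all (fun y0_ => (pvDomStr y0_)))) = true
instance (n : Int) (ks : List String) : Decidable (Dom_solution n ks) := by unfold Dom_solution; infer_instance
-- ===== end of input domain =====

-- B replaces A's destructive chain-removal simulation (with per-p undo) by a direct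
-- closed-form count of chain starts per step p; A mutates ks but fully restores it, so
-- the equivalence is about the return value (A has no net side effect).

-- ===== PORT A =====
-- 'for i in range(first, len(ks)): if ks[i] == "#": ... break / else: ...' (first hit)
def findHashA (ks : List String) (i : Nat) : Option Nat :=
  if h : i < ks.length then
    if ks.getD i "" = "#" then some i else findHashA ks (i + 1)
  else none
termination_by ks.length - i
decreasing_by omega

-- 'for i in range(first, len(ks), p): if ks[i]=="#": ks[i]="."; xs.add(i) else: break'
-- fuel bounds the iteration count; fuel = len(ks) is exact for the step p ≥ 1 used by A
def removeChainA (fuel p : Nat) (ks : List String) (xs : PySem.Set Nat) (i : Nat) :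
    List String × PySem.Set Nat :=
  match fuel with
  | 0 => (ks, xs)
  | fuel + 1 =>
    if i < ks.length then
      if ks.getD i "" = "#" then removeChainA fuel p (ks.set i ".") (xs.add i) (i + p)
      else (ks, xs)
    else (ks, xs)

-- check's 'while True' loop; each full pass removes at least one '#', so
-- fuel = len(ks) + 1 is exact
def checkLoopA (fuel : Nat) (p : Nat) (ks : List String) (xs : PySem.Set Nat)
    (min_num count : Int) (first : Nat) : Int × List String × PySem.Set Nat :=
  match fuel with
  | 0 => (count, ks, xs)
  | fuel + 1 =>
    match findHashA ks first with
    | none => (count, ks, xs)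
    | some i =>
      if min_num ≤ count + 1 then (count + 1, ks, xs)
      else
        let r := removeChainA ks.length p ks xs i
        checkLoopA fuel p r.1 r.2 min_num (count + 1) i

-- body of 'for p in ps' in A's solution; the final 'while xs: ks[xs.pop()] = "#"'
-- sets every index of xs back to '#' (the result does not depend on pop order)
-- and leaves xs empty
def stepA (first : Nat) (st : Int × List String × PySem.Set Nat) (p : Int) :
    Int × List String × PySem.Set Nat :=
  let min_num := st.1
  let ks := st.2.1
  let xs := st.2.2
  let res := checkLoopA (ks.length + 1) p.toNat ks xs min_num 0 first
  let num := res.1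
  let min_num' := if num < min_num then num else min_num
  (min_num', res.2.2.foldl (fun ks i => ks.set i "#") res.2.1, ([] : PySem.Set Nat))

def solution (n : Int) (ks : List String) : Int :=
  let first := (findHashA ks 0).getD 0
  ((PySem.List.pyRange 1 n 1).foldl (stepA first)
    ((10 : Int) ^ 10, ks, ([] : PySem.Set Nat))).1

-- ===== PORT B =====
def solution_alt (n : Int) (ks : List String) : Int :=
  let hs : PySem.Set Int :=
    PySem.Set.ofList ((PySem.List.enumerate ks 0).filterMap
      (fun pc => if pc.2 = "#" then some pc.1 else none))
  (PySem.List.pyRange 1 n 1).foldl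
    (fun best p =>
      min best ((hs.countP (fun i => decide (i < p) || !(PySem.Set.contains hs (i - p)))) : Int))
    ((10 : Int) ^ 10)

-- ===== PRECONDITION & SPEC =====
def Spec_solution (n : Int) (ks : List String) (out : Int) : Prop := out = solution_alt n ks
instance (n : Int) (ks : List String) (out : Int) : Decidable (Spec_solution n ks out) := by
  unfold Spec_solution; infer_instance

-- ===== CLAIM (what is proved, stated in full; the proofs are below) =====
def Claim_equal_solution : Prop := ∀ (n : Int) (ks : List String), Dom_solution n ks → Spec_solution n ks (solution n ks)

-- ===== LEMMAS AND PROOFS =====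

-- position j of ks holds '#'
def isH (ks : List String) (j : Nat) : Bool := ks.getD j "" == "#"

-- j is a chain start for step p
def qB (ks : List String) (p j : Nat) : Bool := isH ks j && (decide (j < p) || !isH ks (j - p))

-- number of chain starts
def startsN (ks : List String) (p : Nat) : Int :=
  ∑ j ∈ Finset.range ks.length, (if qB ks p j then (1 : Int) else 0)

-- number of '#'s
def cntH (ks : List String) : Nat :=
  ∑ j ∈ Finset.range ks.length, (if isH ks j then 1 else 0)

-- the restore loop as a function
def restoreAll (ks : List String) (xs : PySem.Set Nat) : List String :=
  xs.foldl (fun ks i => ks.set i "#") ks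


-- getD through set
theorem isH_true_iff {ks : List String} {j : Nat} : isH ks j = true ↔ ks.getD j "" = "#" := by
  unfold isH; exact beq_iff_eq

theorem isH_false_iff {ks : List String} {j : Nat} : isH ks j = false ↔ ¬ ks.getD j "" = "#" := by
  unfold isH; exact beq_eq_false_iff_ne

theorem isH_oob {ks : List String} {j : Nat} (h : ks.length ≤ j) : isH ks j = false := by
  rw [isH_false_iff, List.getD_eq_default _ _ h]; simp

theorem getD_set_self {ks : List String} {i : Nat} (h : i < ks.length) (v d : String) :
    (ks.set i v).getD i d = v := by
  simp [List.getD_eq_getElem?_getD, h]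

theorem getD_set_ne {ks : List String} {i j : Nat} (h : j ≠ i) (v d : String) :
    (ks.set i v).getD j d = ks.getD j d := by
  simp [List.getD_eq_getElem?_getD, List.getElem?_set_ne (Ne.symm h)]

theorem set_getD_self {ks : List String} {i : Nat} (h : i < ks.length)
    (hv : ks.getD i "" = "#") : ks.set i "#" = ks := by
  have hv' : ks[i] = "#" := by
    rwa [List.getD_eq_getElem?_getD, List.getElem?_eq_getElem h, Option.getD_some] at hv
  apply List.ext_getElem (by simp)
  intro j h1 h2
  rw [List.getElem_set]
  split
  · next heq => subst heq; exact hv'.symm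
  · rfl

-- findHashA specification
theorem findHashA_none {ks : List String} {f : Nat} (h : findHashA ks f = none) :
    ∀ j, f ≤ j → isH ks j = false := by
  intro j hj
  induction f using findHashA.induct ks with
  | case1 i hi hH => rw [findHashA, dif_pos hi, if_pos hH] at h; exact absurd h (by simp)
  | case2 i hi hH ih =>
    rw [findHashA, dif_pos hi, if_neg hH] at h
    rcases Nat.eq_or_lt_of_le hj with rfl | hlt
    · exact isH_false_iff.mpr hH
    · exact ih h hlt
  | case3 i hi => exact isH_oob (by omega)

theorem findHashA_some {ks : List String} {f i : Nat} (h : findHashA ks f = some i) :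
    f ≤ i ∧ i < ks.length ∧ isH ks i = true ∧ ∀ j, f ≤ j → j < i → isH ks j = false := by
  induction f using findHashA.induct ks with
  | case1 j hj hH =>
    rw [findHashA, dif_pos hj, if_pos hH] at h
    obtain rfl : j = i := by simpa using h
    exact ⟨le_refl _, hj, isH_true_iff.mpr hH, fun k h1 h2 => by omega⟩
  | case2 j hj hH ih =>
    rw [findHashA, dif_pos hj, if_neg hH] at h
    obtain ⟨h1, h2, h3, h4⟩ := ih h
    refine ⟨by omega, h2, h3, ?_⟩
    intro k hk1 hk2
    rcases Nat.eq_or_lt_of_le hk1 with rfl | hlt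
    · exact isH_false_iff.mpr hH
    · exact h4 k hlt hk2
  | case3 j hj => rw [findHashA, dif_neg hj] at h; exact absurd h (by simp)

-- a first '#' is a chain start, so startsN ≥ 1
theorem startsN_nonneg (ks : List String) (p : Nat) : 0 ≤ startsN ks p := by
  unfold startsN
  apply Finset.sum_nonneg
  intro j _
  split <;> norm_num

theorem startsN_pos {ks : List String} {p i : Nat} (hp : 1 ≤ p) (hi : i < ks.length)
    (hH : isH ks i = true) (hbelow : ∀ j, j < i → isH ks j = false) :
    1 ≤ startsN ks p := by
  unfold startsN
  have hq : qB ks p i = true := by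
    unfold qB
    rcases Nat.lt_or_ge i p with hc | hc
    · simp [hH, hc]
    · simp [hH, hbelow (i - p) (by omega)]
  calc (1 : Int) = ∑ j ∈ {i}, (if qB ks p j then (1 : Int) else 0) := by
        rw [Finset.sum_singleton, if_pos hq]
    _ ≤ _ := by
        apply Finset.sum_le_sum_of_subset_of_nonneg
        · intro j hj; simp at hj; subst hj; simpa using hi
        · intro j _ _; split <;> norm_num

-- no '#' at all: startsN = 0
theorem startsN_zero {ks : List String} (h : ∀ j, isH ks j = false) (p : Nat) :
    startsN ks p = 0 := by
  unfold startsN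
  apply Finset.sum_eq_zero
  intro j _
  simp [qB, h j]

-- isH through set
theorem isH_set_ne {ks : List String} {i j : Nat} (h : j ≠ i) (v : String) :
    isH (ks.set i v) j = isH ks j := by
  unfold isH; rw [getD_set_ne h]

theorem isH_set_dot {ks : List String} {i : Nat} (hi : i < ks.length) :
    isH (ks.set i ".") i = false := by
  unfold isH; rw [getD_set_self hi]; rfl

-- effect of one ks[i] = '.' on startsN
theorem startsN_set_dot {ks : List String} {p i : Nat} (hp : 1 ≤ p) (hi : i < ks.length)
    (hH : isH ks i = true) (hpred : i < p ∨ isH ks (i - p) = false) :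
    startsN (ks.set i ".") p =
      startsN ks p - 1 + (if i + p < ks.length ∧ isH ks (i + p) = true then 1 else 0) := by
  have hlen : (ks.set i ".").length = ks.length := by simp
  have hip : i ≠ i + p := by omega
  have key : ∀ j ∈ Finset.range ks.length,
      (if qB (ks.set i ".") p j then (1 : Int) else 0)
        = (if qB ks p j then (1 : Int) else 0)
          + ((if j = i then (-1 : Int) else 0)
             + (if j = i + p then (if isH ks (i + p) = true then (1 : Int) else 0) else 0)) := by
    intro j hj
    by_cases hji : j = i
    · subst hji
      have h1 : qB (ks.set j ".") p j = false := by
        unfold qB; rw [isH_set_dot hi]; rfl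
      have h2 : qB ks p j = true := by
        unfold qB
        rcases hpred with hc | hc
        · simp [hH, hc]
        · simp [hH, hc]
      rw [h1, h2, if_pos rfl, if_neg hip]
      norm_num
    · by_cases hjp : j = i + p
      · subst hjp
        have h1 : qB ks p (i + p) = false := by
          unfold qB
          have : ¬ (i + p < p) := by omega
          simp [this, hH]
        have h2 : qB (ks.set i ".") p (i + p) = isH ks (i + p) := by
          unfold qB
          have : ¬ (i + p < p) := by omega
          rw [isH_set_ne (by omega), Nat.add_sub_cancel, isH_set_dot hi]
          simp [this]
        rw [h1, h2, if_neg hji, if_pos rfl]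
        by_cases hc : isH ks (i + p) = true
        · simp [hc]
        · simp [Bool.not_eq_true] at hc; simp [hc]
      · have h1 : qB (ks.set i ".") p j = qB ks p j := by
          unfold qB
          rw [isH_set_ne hji]
          by_cases hjlt : j < p
          · simp [hjlt]
          · have : j - p ≠ i := by omega
            rw [isH_set_ne this]
        rw [h1, if_neg hji, if_neg hjp]
        ring
  unfold startsN
  rw [hlen, Finset.sum_congr rfl key, Finset.sum_add_distrib, Finset.sum_add_distrib,
    Finset.sum_ite_eq' (Finset.range ks.length) i (fun _ => (-1 : Int)),
    Finset.sum_ite_eq' (Finset.range ks.length) (i + p)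
      (fun _ => (if isH ks (i + p) = true then (1 : Int) else 0))]
  rw [if_pos (Finset.mem_range.mpr hi)]
  by_cases hc : i + p < ks.length
  · rw [if_pos (Finset.mem_range.mpr hc)]
    by_cases hc2 : isH ks (i + p) = true
    · simp only [hc, hc2, and_self, if_true]; ring
    · simp only [Bool.not_eq_true] at hc2
      simp only [hc2, Bool.false_eq_true, and_false, if_false]; ring
  · rw [if_neg (by simpa using hc), if_neg (by tauto)]
    ring

-- effect of one ks[i] = '.' on cntH
theorem cntH_set_dot {ks : List String} {i : Nat} (hi : i < ks.length)
    (hH : isH ks i = true) : cntH (ks.set i ".") + 1 = cntH ks := by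
  have hlen : (ks.set i ".").length = ks.length := by simp
  have key : ∀ j ∈ Finset.range ks.length,
      (if isH ks j then (1 : Nat) else 0)
        = (if isH (ks.set i ".") j then (1 : Nat) else 0) + (if j = i then 1 else 0) := by
    intro j hj
    by_cases hji : j = i
    · subst hji; rw [isH_set_dot hi, if_pos hH, if_pos rfl]; rfl
    · rw [isH_set_ne hji, if_neg hji, Nat.add_zero]
  unfold cntH
  rw [hlen]
  conv_rhs => rw [Finset.sum_congr rfl key]
  rw [Finset.sum_add_distrib,
    Finset.sum_ite_eq' (Finset.range ks.length) i (fun _ => (1 : Nat)),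
    if_pos (Finset.mem_range.mpr hi)]


theorem cntH_le_length (ks : List String) : cntH ks ≤ ks.length := by
  unfold cntH
  calc ∑ j ∈ Finset.range ks.length, (if isH ks j then 1 else 0)
      ≤ ∑ _j ∈ Finset.range ks.length, 1 := by
        apply Finset.sum_le_sum; intro j _; split <;> omega
    _ = ks.length := by simp

-- restore-fold helpers
theorem foldl_set_comm {l : List Nat} {i : Nat} (h : i ∉ l) (ks : List String) (v : String) :
    l.foldl (fun ks j => ks.set j "#") (ks.set i v)
      = (l.foldl (fun ks j => ks.set j "#") ks).set i v := by
  induction l generalizing ks with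
  | nil => rfl
  | cons x l ih =>
    simp only [List.foldl_cons]
    rw [List.set_comm _ _ (by simp at h; omega), ih (by simp at h; tauto)]

theorem getD_foldl_set {l : List Nat} {i : Nat} (h : i ∉ l) (ks : List String) (d : String) :
    (l.foldl (fun ks j => ks.set j "#") ks).getD i d = ks.getD i d := by
  induction l generalizing ks with
  | nil => rfl
  | cons x l ih =>
    simp only [List.foldl_cons]
    rw [ih (by simp at h; tauto), getD_set_ne (by simp at h; omega)]

theorem length_foldl_set (l : List Nat) (ks : List String) :
    (l.foldl (fun ks j => ks.set j "#") ks).length = ks.length := by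
  induction l generalizing ks with
  | nil => rfl
  | cons x l ih => simp only [List.foldl_cons]; rw [ih]; simp

theorem restore_step {ks : List String} {xs : PySem.Set Nat} {i : Nat} (hi : i < ks.length)
    (hH : isH ks i = true) (hxs : ∀ j ∈ xs, isH ks j = false) :
    restoreAll (ks.set i ".") (xs.add i) = restoreAll ks xs := by
  have hmem : i ∉ xs := fun hm => by simp [hxs i hm] at hH
  have hadd : xs.add i = xs ++ [i] := by
    simp [PySem.Set.add, PySem.Set.contains, hmem]
  rw [hadd]
  unfold restoreAll
  rw [List.foldl_append, foldl_set_comm hmem, List.foldl_cons, List.foldl_nil,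
    List.set_set]
  have : (xs.foldl (fun ks j => ks.set j "#") ks).set i "#"
      = xs.foldl (fun ks j => ks.set j "#") ks := by
    apply set_getD_self
    · rw [length_foldl_set]; exact hi
    · rw [getD_foldl_set hmem]; simpa [isH] using hH
  rw [this]

-- full specification of the chain removal loop
theorem rc_spec {p : Nat} (hp : 1 ≤ p) :
    ∀ (fuel : Nat) (ks : List String) (xs : PySem.Set Nat) (i : Nat),
      ks.length - i ≤ fuel → i < ks.length → isH ks i = true →
      (i < p ∨ isH ks (i - p) = false) → (∀ j ∈ xs, isH ks j = false) →
      (removeChainA fuel p ks xs i).1.length = ks.length ∧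
      startsN (removeChainA fuel p ks xs i).1 p = startsN ks p - 1 ∧
      cntH (removeChainA fuel p ks xs i).1 < cntH ks ∧
      (∀ j, j < i → (removeChainA fuel p ks xs i).1.getD j "" = ks.getD j "") ∧
      (∀ j ∈ (removeChainA fuel p ks xs i).2, isH (removeChainA fuel p ks xs i).1 j = false) ∧
      restoreAll (removeChainA fuel p ks xs i).1 (removeChainA fuel p ks xs i).2
        = restoreAll ks xs := by
  intro fuel
  induction fuel with
  | zero => intro ks xs i h1 h2 _ _ _; omega
  | succ fuel ih =>
    intro ks xs i h1 h2 hH hpred hxs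
    have hstep : removeChainA (fuel + 1) p ks xs i
        = removeChainA fuel p (ks.set i ".") (xs.add i) (i + p) := by
      simp only [removeChainA]
      rw [if_pos h2, if_pos (isH_true_iff.mp hH)]
    have hxs' : ∀ j ∈ xs.add i, isH (ks.set i ".") j = false := by
      intro j hj
      rcases (PySem.Set.mem_add xs i j).mp hj with hj | rfl
      · by_cases hji : j = i
        · subst hji; exact isH_set_dot h2
        · rw [isH_set_ne hji]; exact hxs j hj
      · exact isH_set_dot h2
    have hrest : restoreAll (ks.set i ".") (xs.add i) = restoreAll ks xs :=
      restore_step h2 hH hxs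
    have hcnt : cntH (ks.set i ".") + 1 = cntH ks := cntH_set_dot h2 hH
    by_cases hc : i + p < ks.length ∧ isH ks (i + p) = true
    · -- the chain continues at i + p
      have hihH : isH (ks.set i ".") (i + p) = true := by
        rw [isH_set_ne (by omega)]; exact hc.2
      have hihpred : i + p < p ∨ isH (ks.set i ".") (i + p - p) = false := by
        right; rw [Nat.add_sub_cancel]; exact isH_set_dot h2
      obtain ⟨c1, c2, c3, c4, c5, c6⟩ :=
        ih (ks.set i ".") (xs.add i) (i + p)
          (by simp; omega) (by simpa using hc.1) hihH hihpred hxs'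
      have hsets : startsN (ks.set i ".") p = startsN ks p := by
        rw [startsN_set_dot hp h2 hH hpred, if_pos hc]; ring
      rw [hstep]
      refine ⟨by simpa using c1, by rw [c2, hsets], by omega, ?_, c5, by rw [c6, hrest]⟩
      · intro j hj
        rw [c4 j (by omega), getD_set_ne (by omega)]
    · -- the chain ends after clearing position i
      have hres : removeChainA fuel p (ks.set i ".") (xs.add i) (i + p)
          = (ks.set i ".", xs.add i) := by
        cases fuel with
        | zero => rfl
        | succ m =>
          simp only [removeChainA]
          by_cases hlt : i + p < ks.length
          · rw [if_pos (by simpa using hlt), if_neg]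
            rw [← isH_true_iff, isH_set_ne (by omega)]
            simp only [Bool.not_eq_true]
            rcases Classical.not_and_iff_not_or_not.mp hc with h | h
            · omega
            · simpa using h
          · rw [if_neg (by simpa using hlt)]
      rw [hstep, hres]
      refine ⟨by simp, ?_, ?_, ?_, hxs', hrest⟩
      · show startsN (ks.set i ".") p = _
        rw [startsN_set_dot hp h2 hH hpred, if_neg hc]; ring
      · show cntH (ks.set i ".") < cntH ks
        omega
      · intro j hj; exact getD_set_ne (by omega) _ _


-- full specification of check's while-loop: it computes min(min_num, count + startsN)
-- and its mutations are undone by the restore loop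
theorem cl_spec {p : Nat} (hp : 1 ≤ p) (min_num : Int) :
    ∀ (fuel : Nat) (ks : List String) (xs : PySem.Set Nat) (count : Int) (f : Nat),
      cntH ks < fuel →
      (∀ j, j < f → isH ks j = false) →
      (∀ j ∈ xs, isH ks j = false) →
      (count < min_num ∨ (count = 0 ∧ 0 ≤ min_num ∧ findHashA ks f = none)) →
      (checkLoopA fuel p ks xs min_num count f).1 = min min_num (count + startsN ks p) ∧
      restoreAll (checkLoopA fuel p ks xs min_num count f).2.1
          (checkLoopA fuel p ks xs min_num count f).2.2 = restoreAll ks xs := by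
  intro fuel
  induction fuel with
  | zero => intro ks xs count f h1 _ _ _; omega
  | succ fuel ih =>
    intro ks xs count f hfuel hbelow hxs hcm
    cases hfind : findHashA ks f with
    | none =>
      have hres : checkLoopA (fuel + 1) p ks xs min_num count f = (count, ks, xs) := by
        simp only [checkLoopA, hfind]
      have hall : ∀ j, isH ks j = false := by
        intro j
        rcases Nat.lt_or_ge j f with hj | hj
        · exact hbelow j hj
        · exact findHashA_none hfind j hj
      rw [hres, startsN_zero hall]
      refine ⟨?_, rfl⟩
      have : count ≤ min_num := by rcases hcm with h | ⟨h1, h2, _⟩ <;> omega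
      omega
    | some i =>
      obtain ⟨hfi, hilen, hiH, hmid⟩ := findHashA_some hfind
      have hbelow' : ∀ j, j < i → isH ks j = false := by
        intro j hj
        rcases Nat.lt_or_ge j f with hjf | hjf
        · exact hbelow j hjf
        · exact hmid j hjf hj
      have hcount : count < min_num := by
        rcases hcm with h | ⟨_, _, hnone⟩
        · exact h
        · rw [hnone] at hfind; exact absurd hfind (by simp)
      have hpos : 1 ≤ startsN ks p := startsN_pos hp hilen hiH hbelow'
      by_cases hret : min_num ≤ count + 1
      · have hres : checkLoopA (fuel + 1) p ks xs min_num count f = (count + 1, ks, xs) := by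
          simp only [checkLoopA, hfind]
          rw [if_pos hret]
        rw [hres]
        exact ⟨by omega, rfl⟩
      · have hres : checkLoopA (fuel + 1) p ks xs min_num count f
            = checkLoopA fuel p (removeChainA ks.length p ks xs i).1
                (removeChainA ks.length p ks xs i).2 min_num (count + 1) i := by
          simp only [checkLoopA, hfind]
          rw [if_neg hret]
        have hpredi : i < p ∨ isH ks (i - p) = false := by
          rcases Nat.lt_or_ge i p with h | h
          · exact Or.inl h
          · exact Or.inr (hbelow' (i - p) (by omega))
        obtain ⟨r1, r2, r3, r4, r5, r6⟩ :=
          rc_spec hp ks.length ks xs i (by omega) hilen hiH hpredi hxs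
        have hbelow2 : ∀ j, j < i →
            isH (removeChainA ks.length p ks xs i).1 j = false := by
          intro j hj
          rw [show isH (removeChainA ks.length p ks xs i).1 j
              = ((removeChainA ks.length p ks xs i).1.getD j "" == "#") from rfl, r4 j hj]
          exact hbelow' j hj
        obtain ⟨m1, m2⟩ := ih (removeChainA ks.length p ks xs i).1
          (removeChainA ks.length p ks xs i).2 (count + 1) i
          (by omega) hbelow2 r5 (Or.inl (by omega))
        rw [hres, m1, m2, r6, r2]
        exact ⟨by ring_nf, rfl⟩


-- ----- B-side bridge: the de-duplicated index set and its count equal startsN -----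

-- the '#'-position list B builds
theorem enum_filterMap_eq (ks : List String) : ∀ (s : Int),
    (PySem.List.enumerate ks s).filterMap (fun pc => if pc.2 = "#" then some pc.1 else none)
      = ((List.range ks.length).filter (fun j => isH ks j)).map (fun j : Nat => s + (j : Int)) := by
  induction ks with
  | nil => intro s; rfl
  | cons x ks ih =>
    intro s
    rw [PySem.List.enumerate_cons, List.filterMap_cons, List.length_cons,
      List.range_succ_eq_map, List.filter_cons, List.filter_map]
    have hh : (fun j => isH (x :: ks) j) ∘ Nat.succ = fun j => isH ks j := by
      funext j
      simp [Function.comp, isH]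
    rw [hh]
    have hmm : List.map (fun j : Nat => s + (j : Int)) (List.map Nat.succ ((List.range ks.length).filter (fun j => isH ks j)))
        = List.map (fun j : Nat => (s + 1) + (j : Int)) ((List.range ks.length).filter (fun j => isH ks j)) := by
      rw [List.map_map]
      apply List.map_congr_left
      intro j _
      simp only [Function.comp]
      push_cast [Nat.succ_eq_add_one]
      ring
    have h0 : isH (x :: ks) 0 = (x == "#") := by simp [isH]
    by_cases hx : x = "#"
    · rw [if_pos hx]
      have : isH (x :: ks) 0 = true := by rw [h0, hx]; simp
      simp only [this, if_true]
      rw [List.map_cons, ih (s + 1), hmm]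
      simp
    · rw [if_neg hx]
      have : isH (x :: ks) 0 = false := by rw [h0]; simp [hx]
      simp only [this, Bool.false_eq_true, if_false]
      rw [ih (s + 1), hmm]

def hsL (ks : List String) : List Int :=
  ((List.range ks.length).filter (fun j => isH ks j)).map (fun j : Nat => (j : Int))

theorem hsL_eq (ks : List String) :
    (PySem.List.enumerate ks 0).filterMap (fun pc => if pc.2 = "#" then some pc.1 else none)
      = hsL ks := by
  rw [enum_filterMap_eq ks 0]
  unfold hsL
  apply List.map_congr_left
  intro j _
  omega

theorem hsL_nodup (ks : List String) : (hsL ks).Nodup := by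
  unfold hsL
  apply List.Nodup.map
  · intro a b h; simp only [] at h; exact_mod_cast h
  · exact List.Nodup.filter _ List.nodup_range

theorem mem_hsL (ks : List String) (y : Int) :
    y ∈ hsL ks ↔ 0 ≤ y ∧ isH ks y.toNat = true := by
  unfold hsL
  simp only [List.mem_map, List.mem_filter, List.mem_range]
  constructor
  · rintro ⟨j, ⟨hj, hH⟩, rfl⟩
    exact ⟨by omega, by simpa using hH⟩
  · rintro ⟨h0, hH⟩
    refine ⟨y.toNat, ⟨?_, hH⟩, by omega⟩
    by_contra hge
    rw [isH_oob (by omega)] at hH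
    simp at hH
  
theorem contains_hsL (ks : List String) (y : Int) :
    PySem.Set.contains (hsL ks) y = (decide (0 ≤ y) && isH ks y.toNat) := by
  rcases h : (decide (0 ≤ y) && isH ks y.toNat) with _ | _
  · rw [Bool.eq_false_iff]
    intro hc
    have : y ∈ hsL ks := by simpa [PySem.Set.contains] using hc
    rw [mem_hsL] at this
    simp only [Bool.and_eq_false_iff] at h
    rcases h with h | h
    · simp at h; omega
    · rw [this.2] at h; simp at h
  · simp only [Bool.and_eq_true] at h
    have : y ∈ hsL ks := (mem_hsL ks y).mpr ⟨by simpa using h.1, h.2⟩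
    simpa [PySem.Set.contains] using this

-- a 0/1 countP over range as the startsN sum
theorem countP_range_eq_sum (n : Nat) (q : Nat → Bool) :
    ((List.range n).countP q : Int) = ∑ j ∈ Finset.range n, (if q j then (1 : Int) else 0) := by
  induction n with
  | zero => rfl
  | succ n ih =>
    rw [List.range_succ, List.countP_append, Finset.sum_range_succ, ← ih]
    by_cases hq : q n = true
    · simp [hq]
    · simp [hq]

-- B's per-p count equals startsN
theorem countB_eq_startsN (ks : List String) (p : Int) (hp : 1 ≤ p) :
    (((hsL ks).countP
        (fun i => decide (i < p) || !(PySem.Set.contains (hsL ks) (i - p)))) : Int)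
      = startsN ks p.toNat := by
  have step1 : (hsL ks).countP
        (fun i => decide (i < p) || !(PySem.Set.contains (hsL ks) (i - p)))
      = (hsL ks).countP
        (fun i => decide (i < p) || !(decide (0 ≤ i - p) && isH ks (i - p).toNat)) := by
    apply List.countP_congr
    intro x _
    rw [contains_hsL]
  rw [step1]
  unfold hsL
  rw [List.countP_map, List.countP_filter]
  have hpt : (List.range ks.length).countP
      (fun j => ((fun i => decide (i < p) || !(decide (0 ≤ i - p) && isH ks (i - p).toNat)) ∘
        (fun j : Nat => (j : Int))) j && isH ks j)
      = (List.range ks.length).countP (qB ks p.toNat) := by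
    apply List.countP_congr
    intro j _
    simp only [Function.comp, qB]
    by_cases hj : j < p.toNat
    · have c1 : decide ((j : Int) < p) = true := by simp; omega
      have c2 : decide (j < p.toNat) = true := by simp [hj]
      rw [c1, c2]
      cases isH ks j <;> simp
    · have c1 : decide ((j : Int) < p) = false := by simp; omega
      have c2 : decide (j < p.toNat) = false := by simp; omega
      have c3 : decide (0 ≤ (j : Int) - p) = true := by simp; omega
      have c4 : ((j : Int) - p).toNat = j - p.toNat := by omega
      rw [c1, c2, c3, c4]
      cases isH ks j <;> cases isH ks (j - p.toNat) <;> simp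
  rw [hpt, countP_range_eq_sum]
  rfl


-- one round of A's p-loop: compute the min, restore ks, empty xs
theorem stepA_eq (ks0 : List String) (f0 : Nat) (hf0 : ∀ j, j < f0 → isH ks0 j = false)
    (p : Int) (hp : 1 ≤ p) (mn : Int) (h0 : 0 ≤ mn)
    (hn : mn = 0 → findHashA ks0 f0 = none) :
    stepA f0 (mn, ks0, ([] : PySem.Set Nat)) p
      = (min mn (startsN ks0 p.toNat), ks0, ([] : PySem.Set Nat)) := by
  have hp' : 1 ≤ p.toNat := by omega
  have hcm : (0 : Int) < mn ∨ ((0 : Int) = 0 ∧ 0 ≤ mn ∧ findHashA ks0 f0 = none) := by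
    rcases lt_or_eq_of_le h0 with h | h
    · exact Or.inl h
    · exact Or.inr ⟨rfl, h0, hn h.symm⟩
  obtain ⟨h1, h2⟩ := cl_spec hp' mn (ks0.length + 1) ks0 [] 0 f0
    (by have := cntH_le_length ks0; omega) hf0 (by simp) hcm
  simp only [stepA]
  rw [Prod.mk.injEq, Prod.mk.injEq]
  refine ⟨?_, ?_, rfl⟩
  · rw [h1]
    have hs0 := startsN_nonneg ks0 p.toNat
    rw [zero_add]
    split_ifs with h
    · rfl
    · rcases le_total mn (startsN ks0 p.toNat) with hle | hle
      · rw [min_eq_left hle]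
      · rw [min_eq_right hle] at h ⊢
        omega
  · exact h2

-- the whole p-loop: A's running minimum is the fold of min over startsN
theorem foldA_spec (ks0 : List String) (f0 : Nat) (hf0 : ∀ j, j < f0 → isH ks0 j = false) :
    ∀ (ps : List Int), (∀ p ∈ ps, 1 ≤ p) →
      ∀ (mn : Int), 0 ≤ mn → (mn = 0 → findHashA ks0 f0 = none) →
      (ps.foldl (stepA f0) (mn, ks0, ([] : PySem.Set Nat))).1
        = ps.foldl (fun best p => min best (startsN ks0 p.toNat)) mn := by
  intro ps
  induction ps with
  | nil => intro _ mn _ _; rfl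
  | cons p ps ih =>
    intro hps mn h0 hn
    have hp : 1 ≤ p := hps p (by simp)
    rw [List.foldl_cons, List.foldl_cons, stepA_eq ks0 f0 hf0 p hp mn h0 hn]
    have hs0 := startsN_nonneg ks0 p.toNat
    apply ih (fun q hq => hps q (by simp [hq]))
    · exact le_min h0 hs0
    · intro hmin
      by_cases hmn : mn = 0
      · exact hn hmn
      · have hs : startsN ks0 p.toNat = 0 := by
          rcases le_total mn (startsN ks0 p.toNat) with h | h
          · rw [min_eq_left h] at hmin; omega
          · rw [min_eq_right h] at hmin; exact hmin
        cases hfind : findHashA ks0 f0 with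
        | none => rfl
        | some i =>
          obtain ⟨hf, hlen, hH, hmid⟩ := findHashA_some hfind
          have hbelow : ∀ j, j < i → isH ks0 j = false := by
            intro j hj
            rcases Nat.lt_or_ge j f0 with h | h
            · exact hf0 j h
            · exact hmid j h hj
          have := startsN_pos (by omega : 1 ≤ p.toNat) hlen hH hbelow
          omega

theorem solution_spec : Claim_equal_solution := by
  intro n ks _
  show solution n ks = solution_alt n ks
  have hf0 : ∀ j, j < (findHashA ks 0).getD 0 → isH ks j = false := by
    cases h : findHashA ks 0 with
    | none => intro j hj; simp at hj
    | some i =>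
      obtain ⟨_, _, _, hmid⟩ := findHashA_some h
      intro j hj
      simp only [Option.getD_some] at hj
      exact hmid j (by omega) hj
  have hA : solution n ks
      = (PySem.List.pyRange 1 n 1).foldl
          (fun best p => min best (startsN ks p.toNat)) ((10 : Int) ^ 10) := by
    unfold solution
    apply foldA_spec ks _ hf0
    · intro p hp
      exact (PySem.List.mem_pyRange_one.mp hp).1
    · norm_num
    · intro h; norm_num at h
  have hB : solution_alt n ks
      = (PySem.List.pyRange 1 n 1).foldl
          (fun best p => min best (startsN ks p.toNat)) ((10 : Int) ^ 10) := by
    unfold solution_alt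
    rw [hsL_eq ks, PySem.Set.ofList_eq_self_of_nodup _ (hsL_nodup ks)]
    apply PySem.List.foldl_congr_mem
    intro best p hp
    rw [countB_eq_startsN ks p (PySem.List.mem_pyRange_one.mp hp).1]
  rw [hA, hB]
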